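-- pv_equiv track=rewrite | github.com/Wizmann/ACM-ICPC | Leetcode/Algorithm/python/3000/03759-Count Elements With at Least K Greater Values.py | countElements
-- ===== SOURCE A (Python) =====
-- from collections import Counter
--
-- def countElements(nums, k):
--     c = sorted(Counter(nums).items(), reverse=True)
--     pre = 0
--     res = 0
--     for (key, count) in c:
--         if pre >= k:
--             res += count
--         pre += count
--     return res
-- ===== SOURCE B (Python) =====
-- def countElements(nums, k):
--     return len([x for x in nums if len([y for y in nums if y > x]) >= k])
-- ===== Notes on version B (the rewrite author's own statement) =====
-- stated objective: simpler
-- what changed: Replaced A's Counter + descending sort + running prefix-sum scan by a direct two-level count: an element is counted iff the number of strictly greater elements is at least k.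
import Mathlib
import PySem

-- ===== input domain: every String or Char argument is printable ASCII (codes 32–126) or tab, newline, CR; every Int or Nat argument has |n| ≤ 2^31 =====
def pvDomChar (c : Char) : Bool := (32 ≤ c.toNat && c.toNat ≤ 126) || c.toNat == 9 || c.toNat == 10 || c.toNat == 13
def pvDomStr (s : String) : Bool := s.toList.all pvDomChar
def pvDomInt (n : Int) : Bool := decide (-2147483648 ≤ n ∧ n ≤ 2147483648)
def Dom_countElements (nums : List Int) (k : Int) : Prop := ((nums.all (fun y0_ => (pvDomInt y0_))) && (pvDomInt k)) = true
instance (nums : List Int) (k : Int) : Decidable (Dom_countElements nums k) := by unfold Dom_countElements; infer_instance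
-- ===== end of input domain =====

-- B replaces A's Counter + descending sort + prefix-sum scan by a direct count of the
-- elements having at least k strictly greater elements (simpler structure, not faster).

-- ===== PORT A =====
def countElements (nums : List Int) (k : Int) : Int :=
  let c := PySem.List.sorted2 (PySem.Dict.counter nums).items Prod.fst Prod.snd true
  (c.foldl (fun (st : Int × Int) kc =>
      (st.1 + kc.2, if st.1 ≥ k then st.2 + kc.2 else st.2)) ((0 : Int), (0 : Int))).2

-- ===== PORT B =====
def countElements_alt (nums : List Int) (k : Int) : Int :=
  ((nums.filter (fun x =>
      decide ((((nums.filter (fun y => decide (y > x))).length : Int)) ≥ k))).length : Int)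

-- ===== PRECONDITION & SPEC =====
def Spec_countElements (nums : List Int) (k : Int) (out : Int) : Prop := out = countElements_alt nums k
instance (nums : List Int) (k : Int) (out : Int) : Decidable (Spec_countElements nums k out) := by unfold Spec_countElements; infer_instance

-- ===== CLAIM (what is proved, stated in full; the proofs are below) =====
def Claim_equal_countElements : Prop := ∀ (nums : List Int) (k : Int), Dom_countElements nums k → Spec_countElements nums k (countElements nums k)

-- ===== LEMMAS AND PROOFS =====

theorem pv_insertBy_congr {α : Type} (b1 b2 : α → α → Bool) (x : α) (acc : List α)
    (h : ∀ y ∈ acc, b1 x y = b2 x y) :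
    PySem.List.insertBy b1 x acc = PySem.List.insertBy b2 x acc := by
  induction acc with
  | nil => rfl
  | cons y ys ih =>
    simp only [PySem.List.insertBy]
    rw [h y (by simp)]
    split
    · rfl
    · rw [ih (fun z hz => h z (by simp [hz]))]

theorem pv_foldl_insertBy_congr {α : Type} (b1 b2 : α → α → Bool) (xs acc : List α)
    (h : ∀ x ∈ xs, ∀ y, (y ∈ acc ∨ y ∈ xs) → b1 x y = b2 x y) :
    xs.foldl (fun a x => PySem.List.insertBy b1 x a) acc
      = xs.foldl (fun a x => PySem.List.insertBy b2 x a) acc := by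
  induction xs generalizing acc with
  | nil => rfl
  | cons x xs ih =>
    simp only [List.foldl_cons]
    rw [pv_insertBy_congr b1 b2 x acc (fun y hy => h x (by simp) y (Or.inl hy))]
    apply ih
    intro z hz y hy
    apply h z (by simp [hz])
    rcases hy with hy | hy
    · rw [PySem.List.insertBy_mem_iff] at hy
      rcases hy with hy | hy
      · exact Or.inr (by simp [hy])
      · exact Or.inl hy
    · exact Or.inr (by simp [hy])

theorem pv_sorted2_eq_sorted (xs : List (Int × Int))
    (h : ∀ a ∈ xs, ∀ b ∈ xs, a.1 = b.1 → a = b) :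
    PySem.List.sorted2 xs Prod.fst Prod.snd true = PySem.List.sorted xs Prod.fst true := by
  show xs.foldl (fun acc x => PySem.List.insertBy _ x acc) []
      = xs.foldl (fun acc x => PySem.List.insertBy _ x acc) []
  apply pv_foldl_insertBy_congr
  intro a ha y hy
  have hy' : y ∈ xs := by
    rcases hy with hy | hy
    · simp at hy
    · exact hy
  by_cases hlt : y.1 < a.1
  · simp [hlt]
  · by_cases hgt : a.1 < y.1
    · simp [hlt, hgt]
    · have : y.1 = a.1 := le_antisymm (not_lt.mp hgt) (not_lt.mp hlt)
      have : y = a := h y hy' a ha this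
      subst this
      simp

theorem pv_countP_append_singleton (nums p : List Int) (v : Int) (hv : v ∉ p) :
    nums.countP (fun y => decide (y ∈ p ++ [v]))
      = nums.countP (fun y => decide (y ∈ p)) + nums.count v := by
  induction nums with
  | nil => simp
  | cons x nums ih =>
    simp only [List.countP_cons, List.count_cons, ih]
    by_cases hxv : x = v
    · subst hxv
      simp [hv]
      omega
    · by_cases hxp : x ∈ p
      · simp [hxv, hxp]
        omega
      · simp [hxv, hxp]

theorem pv_sum_indicator (l : List Int) (x : Int) (hl : l.Nodup) :
    ((l.map (fun v => if v = x then (1 : Int) else 0)).sum) = if x ∈ l then 1 else 0 := by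
  induction l with
  | nil => simp
  | cons y ys ih =>
    simp only [List.map_cons, List.sum_cons, ih hl.of_cons]
    by_cases hyx : y = x
    · subst hyx
      simp [(List.nodup_cons.mp hl).1]
    · simp [hyx, Ne.symm hyx]

theorem pv_sum_map_add (l : List Int) (g h : Int → Int) :
    ((l.map (fun v => g v + h v)).sum) = (l.map g).sum + (l.map h).sum := by
  induction l with
  | nil => simp
  | cons y ys ih => simp [ih]; ring

theorem pv_sum_count (nums S : List Int) (P : Int → Bool) (hS : S.Nodup)
    (hmem : ∀ y ∈ nums, y ∈ S) :
    (nums.countP P : Int) = ((S.filter P).map (fun v => (nums.count v : Int))).sum := by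
  induction nums with
  | nil => simp
  | cons x nums ih =>
    have hx : x ∈ S := hmem x (by simp)
    have hrec := ih (fun y hy => hmem y (by simp [hy]))
    simp only [List.countP_cons, List.count_cons]
    have hmap : ((S.filter P).map (fun v => ((nums.count v + if x == v then 1 else 0 : Nat) : Int))).sum
        = ((S.filter P).map (fun v => (nums.count v : Int))).sum
          + ((S.filter P).map (fun v => if v = x then (1 : Int) else 0)).sum := by
      rw [← pv_sum_map_add]
      congr 1
      apply List.map_congr_left
      intro v hv
      by_cases hvx : v = x
      · simp [hvx]
      · simp [hvx, Ne.symm hvx]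
    rw [hmap, pv_sum_indicator _ _ (hS.filter P), ← hrec]
    by_cases hPx : P x
    · simp [hPx, List.mem_filter, hx]
    · simp [hPx, List.mem_filter]

theorem pv_loopA (nums : List Int) (k : Int) (d : List Int) :
    ∀ (p : List Int) (res : Int),
    (p ++ d).Pairwise (fun a b => b < a) →
    (∀ y ∈ nums, y ∈ p ++ d) →
    ((d.map (fun v => (v, (nums.count v : Int)))).foldl
        (fun (st : Int × Int) kc => (st.1 + kc.2, if st.1 ≥ k then st.2 + kc.2 else st.2))
        ((nums.countP (fun y => decide (y ∈ p)) : Int), res)).2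
      = res + ((d.filter (fun v =>
            decide (((nums.countP (fun y => decide (v < y)) : Int)) ≥ k))).map
              (fun v => (nums.count v : Int))).sum := by
  induction d with
  | nil => intro p res _ _; simp
  | cons v d' ih =>
    intro p res hsort hmem
    -- facts from sortedness
    have hpv : ∀ y ∈ p, v < y := by
      intro y hy
      exact (List.pairwise_append.mp hsort).2.2 y hy v (by simp)
    have hd'v : ∀ y ∈ d', y < v := by
      intro y hy
      exact (List.pairwise_cons.mp (List.pairwise_append.mp hsort).2.1).1 y hy
    have hvnp : v ∉ p := fun hvp => lt_irrefl v (hpv v hvp)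
    -- pre = number of elements of nums strictly greater than v
    have hpre : nums.countP (fun y => decide (y ∈ p)) = nums.countP (fun y => decide (v < y)) := by
      apply List.countP_congr
      intro y hy
      simp only [decide_eq_true_eq]
      constructor
      · exact fun h => hpv y h
      · intro hlt
        have := hmem y hy
        rcases List.mem_append.mp this with h | h
        · exact h
        · rcases List.mem_cons.mp h with h | h
          · exact absurd hlt (by simp [h])
          · exact absurd hlt (by exact not_lt.mpr (le_of_lt (hd'v y h)))
    have hsort' : ((p ++ [v]) ++ d').Pairwise (fun a b => b < a) := by
      rw [← List.append_cons]; exact hsort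
    have hmem' : ∀ y ∈ nums, y ∈ (p ++ [v]) ++ d' := by
      intro y hy
      rw [← List.append_cons]; exact hmem y hy
    simp only [List.map_cons, List.foldl_cons]
    have hnewpre : nums.countP (fun y => decide (y ∈ p)) + nums.count v
        = nums.countP (fun y => decide (y ∈ p ++ [v])) :=
      (pv_countP_append_singleton nums p v hvnp).symm
    have step := ih (p ++ [v]) (if (nums.countP (fun y => decide (y ∈ p)) : Int) ≥ k
        then res + (nums.count v : Int) else res) hsort' hmem'
    have hcast : ((nums.countP (fun y => decide (y ∈ p)) : Int) + (nums.count v : Int))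
        = (nums.countP (fun y => decide (y ∈ p ++ [v])) : Int) := by
      push_cast [← hnewpre]; ring
    rw [hcast, step]
    rw [List.filter_cons]
    by_cases hk : (nums.countP (fun y => decide (v < y)) : Int) ≥ k
    · have : (nums.countP (fun y => decide (y ∈ p)) : Int) ≥ k := by rw [hpre]; exact hk
      simp [hk, this]
      ring
    · have : ¬ (nums.countP (fun y => decide (y ∈ p)) : Int) ≥ k := by rw [hpre]; exact hk
      simp [hk, this]

theorem countElements_eq (nums : List Int) (k : Int) :
    countElements nums k = countElements_alt nums k := by
  have hS : (PySem.Set.ofList nums).Nodup := PySem.Set.nodup_ofList nums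
  set d₀ := PySem.List.sorted (PySem.Set.ofList nums) (fun x => x) true with hd₀
  have hperm : d₀.Perm (PySem.Set.ofList nums) := PySem.List.sorted_perm _ _ _
  have hnd : d₀.Nodup := hperm.symm.nodup hS
  have hdesc : d₀.Pairwise (fun a b => b < a) := by
    have h1 : d₀.Pairwise (fun a b => (fun x => x) b ≤ (fun x => x) a) :=
      PySem.List.sorted_pairwise_rev _ _
    exact (h1.and hnd).imp (fun {a b} h => lt_of_le_of_ne h.1 (Ne.symm h.2))
  have hmemd : ∀ y ∈ nums, y ∈ d₀ := by
    intro y hy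
    rw [hd₀, PySem.List.mem_sorted]
    simp [PySem.Set.mem_ofList, hy]
  -- the sorted counter items are d₀ tagged with multiplicities
  have hitems : PySem.List.sorted2 (PySem.Dict.counter nums).items Prod.fst Prod.snd true
      = d₀.map (fun v => (v, (nums.count v : Int))) := by
    rw [pv_sorted2_eq_sorted]
    · apply PySem.List.sorted_rev_eq_of_perm_of_pairwise_gt
      · rw [PySem.Dict.items_counter]
        exact hperm.map _
      · rw [List.pairwise_map]
        exact hdesc
    · intro a ha b hb hab
      rw [PySem.Dict.items_counter] at ha hb
      rcases List.mem_map.mp ha with ⟨va, _, rfl⟩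
      rcases List.mem_map.mp hb with ⟨vb, _, rfl⟩
      simp only at hab
      simp [hab]
  have hA := pv_loopA nums k d₀ [] 0 (by simpa using hdesc) (by simpa using hmemd)
  have h0 : nums.countP (fun y => decide (y ∈ ([] : List Int))) = 0 := by simp
  rw [h0] at hA
  simp only [Nat.cast_zero, zero_add] at hA
  simp only [countElements]
  rw [hitems, hA]
  rw [← pv_sum_count nums d₀ _ hnd hmemd]
  unfold countElements_alt
  simp only [← List.countP_eq_length_filter, gt_iff_lt]

-- ===== VERDICT (by name: the statement is the Claim_ definition above) =====
theorem countElements_spec : Claim_equal_countElements := by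
  intro nums k _
  exact countElements_eq nums k
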